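-- pv_equiv track=rewrite | github.com/haydarevren/leetcode-hard | watering-plants-ii.py | minimumRefill
-- ===== SOURCE A (Python) =====
-- from typing import List
--
-- def minimumRefill(plants: List[int], capacityA: int, capacityB: int) -> int:
--     if len(plants)<=2: return 0
--
--     res =0
--     l =0
--     r = len(plants)-1
--     a =capacityA
--     b =capacityB
--     while r-l>0:
--         if plants[l]<=a:
--             a -= plants[l]
--         else:
--             a =capacityA - plants[l]
--             res+=1
--         l+=1
--
--         if plants[r]<=b:
--             b -= plants[r]
--         else:
--             b =capacityB - plants[r]
--             res+=1
--         r-=1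
--
--     if r-l==0 and max(a,b)<plants[l]: res +=1
--
--     return res
-- ===== SOURCE B (Python) =====
-- def _pass(seq, cap):
--     # Refill count and final tank of one gardener, computed from a prefix-sum
--     # table: a refill happens at plant i exactly when the water used since the
--     # last refill (pre[i+1] - pre[last]) exceeds cap.
--     pre = [0]
--     for p in seq:
--         pre.append(pre[-1] + p)
--     refills = 0
--     last = 0
--     for i in range(len(seq)):
--         if pre[i + 1] - pre[last] > cap:
--             refills += 1
--             last = i
--     return refills, cap - (pre[len(seq)] - pre[last])
--
-- def minimumRefill(plants, capacityA, capacityB):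
--     n = len(plants)
--     if n <= 2:
--         return 0
--     m = n // 2
--     ra, ta = _pass(plants[:m], capacityA)
--     rb, tb = _pass(plants[n - m:][::-1], capacityB)
--     res = ra + rb
--     if n % 2 == 1 and max(ta, tb) < plants[m]:
--         res += 1
--     return res
-- ===== Notes on version B (the rewrite author's own statement) =====
-- stated objective: alternative
-- what changed: Replaces A's interleaved two-pointer tank simulation with a prefix-sum formulation: each gardener's refills are the threshold crossings pre[i+1]-pre[last] > capacity over a precomputed prefix-sum table (no tank is maintained), applied in two directional passes plus a middle-plant check.
import Mathlib
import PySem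

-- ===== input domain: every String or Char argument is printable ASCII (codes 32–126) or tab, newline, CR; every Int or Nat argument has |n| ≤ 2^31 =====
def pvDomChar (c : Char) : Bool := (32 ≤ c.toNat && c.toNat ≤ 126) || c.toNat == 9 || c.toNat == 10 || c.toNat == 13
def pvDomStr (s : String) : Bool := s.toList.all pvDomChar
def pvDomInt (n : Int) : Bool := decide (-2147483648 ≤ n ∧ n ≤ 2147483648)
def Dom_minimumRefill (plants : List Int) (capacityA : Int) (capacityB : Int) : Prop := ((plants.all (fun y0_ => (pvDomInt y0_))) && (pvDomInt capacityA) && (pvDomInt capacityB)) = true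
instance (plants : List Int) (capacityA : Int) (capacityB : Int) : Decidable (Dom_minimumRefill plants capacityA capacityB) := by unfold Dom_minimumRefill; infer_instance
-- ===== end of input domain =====

-- B replaces A's interleaved two-pointer tank simulation by a prefix-sum formulation:
-- each gardener's refills are the threshold crossings pre[i+1] - pre[last] > capacity
-- over a precomputed prefix-sum table (no tank maintained), in two directional passes
-- plus a middle-plant check; alternative algorithm, same cost.

-- ===== PORT A =====
-- plants[i] in A is always in range when evaluated; the `.getD 0` default is only a totality guard.
def pvGetD (plants : List Int) (i : Int) : Int := (PySem.List.pyGet? plants i).getD 0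

-- the `while r-l>0` loop of A, on the same state (l, r, a, b, res);
-- fuel is only a structural totality guard (plants.length always suffices)
def minimumRefillGo (plants : List Int) (capacityA capacityB : Int)
    (fuel : Nat) (l r a b res : Int) : Int × Int × Int × Int × Int :=
  match fuel with
  | 0 => (l, r, a, b, res)
  | Nat.succ fuel =>
    if r - l > 0 then
      let pl := pvGetD plants l
      let a' := if pl ≤ a then a - pl else capacityA - pl
      let res₁ := if pl ≤ a then res else res + 1
      let pr := pvGetD plants r
      let b' := if pr ≤ b then b - pr else capacityB - pr
      let res₂ := if pr ≤ b then res₁ else res₁ + 1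
      minimumRefillGo plants capacityA capacityB fuel (l + 1) (r - 1) a' b' res₂
    else (l, r, a, b, res)

def minimumRefill (plants : List Int) (capacityA : Int) (capacityB : Int) : Int :=
  if plants.length ≤ 2 then 0
  else
    let s := minimumRefillGo plants capacityA capacityB plants.length 0
               ((plants.length : Int) - 1) capacityA capacityB 0
    if s.2.1 - s.1 = 0 ∧ max s.2.2.1 s.2.2.2.1 < pvGetD plants s.1
    then s.2.2.2.2 + 1 else s.2.2.2.2

-- ===== PORT B =====
-- `pre = [0]; for p in seq: pre.append(pre[-1] + p)` — the prefix-sum table of _pass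
def altPre (seq : List Int) : List Int :=
  seq.foldl (fun pre p => pre ++ [(PySem.List.pyGet? pre (-1)).getD 0 + p]) [0]

-- `_pass(seq, cap)`: count the crossings pre[i+1] - pre[last] > cap, then the final tank
def altPass (seq : List Int) (cap : Int) : Int × Int :=
  let pre := altPre seq
  let st := (List.range seq.length).foldl
    (fun (st : Int × Int) (i : Nat) =>
      if pvGetD pre ((i : Int) + 1) - pvGetD pre st.2 > cap then (st.1 + 1, (i : Int)) else st)
    (0, 0)
  (st.1, cap - (pvGetD pre (seq.length : Int) - pvGetD pre st.2))

def minimumRefill_alt (plants : List Int) (capacityA : Int) (capacityB : Int) : Int :=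
  let n := plants.length
  if n ≤ 2 then 0
  else
    let m := n / 2
    -- plants[:m] and plants[n-m:][::-1] ([::-1] ported as .reverse, exact)
    let fa := altPass (PySem.List.slice plants none (some (m : Int))) capacityA
    let fb := altPass ((PySem.List.slice plants (some ((n - m : Nat) : Int)) none).reverse) capacityB
    let res := fa.1 + fb.1
    if n % 2 = 1 ∧ max fa.2 fb.2 < pvGetD plants (m : Int) then res + 1 else res

-- ===== PRECONDITION & SPEC =====
def Spec_minimumRefill (plants : List Int) (capacityA : Int) (capacityB : Int) (out : Int) : Prop := out = minimumRefill_alt plants capacityA capacityB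
instance (plants : List Int) (capacityA : Int) (capacityB : Int) (out : Int) : Decidable (Spec_minimumRefill plants capacityA capacityB out) := by unfold Spec_minimumRefill; infer_instance

-- ===== CLAIM (what is proved, stated in full; the proofs are below) =====
def Claim_equal_minimumRefill : Prop := ∀ (plants : List Int) (capacityA : Int) (capacityB : Int), Dom_minimumRefill plants capacityA capacityB → Spec_minimumRefill plants capacityA capacityB (minimumRefill plants capacityA capacityB)

-- ===== LEMMAS AND PROOFS =====

-- one watering step of a single gardener (proof-side abstraction of both programs)
def altStep (cap : Int) (st : Int × Int) (p : Int) : Int × Int :=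
  if p ≤ st.1 then (st.1 - p, st.2) else (cap - p, st.2 + 1)

-- the refill counter threads additively through a gardener's fold
theorem foldl_altStep_add (cap : Int) (xs : List Int) (a r : Int) :
    xs.foldl (altStep cap) (a, r)
      = ((xs.foldl (altStep cap) (a, 0)).1, r + (xs.foldl (altStep cap) (a, 0)).2) := by
  induction xs generalizing a r with
  | nil => simp
  | cons x xs ih =>
    simp only [List.foldl_cons, altStep]
    by_cases h : x ≤ a
    · simp only [h, if_pos]
      rw [ih (a - x) r]
    · simp only [h, if_false]
      rw [ih (cap - x) (r + 1), ih (cap - x) (0 + 1)]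
      refine Prod.ext rfl ?_
      simp; ring

-- A's interleaved loop, run for t iterations, equals two independent folds
theorem go_eq (plants : List Int) (cA cB : Int) (t : Nat) :
    ∀ (fuel : Nat) (l r a b res : Int), t ≤ fuel → (r - l = 2 * t ∨ r - l = 2 * t - 1) →
    minimumRefillGo plants cA cB fuel l r a b res =
      (l + t, r - t,
       (((List.range t).map (fun k : Nat => pvGetD plants (l + (k : Int)))).foldl (altStep cA) (a, 0)).1,
       (((List.range t).map (fun k : Nat => pvGetD plants (r - (k : Int)))).foldl (altStep cB) (b, 0)).1,
       res + (((List.range t).map (fun k : Nat => pvGetD plants (l + (k : Int)))).foldl (altStep cA) (a, 0)).2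
           + (((List.range t).map (fun k : Nat => pvGetD plants (r - (k : Int)))).foldl (altStep cB) (b, 0)).2) := by
  induction t with
  | zero =>
    intro fuel l r a b res hf h
    have hneg : ¬ r - l > 0 := by omega
    cases fuel with
    | zero => simp [minimumRefillGo]
    | succ fuel => rw [minimumRefillGo, if_neg hneg]; simp
  | succ t ih =>
    intro fuel l r a b res hf h
    have hpos : r - l > 0 := by omega
    obtain ⟨fuel, rfl⟩ : ∃ f, fuel = f + 1 := ⟨fuel - 1, by omega⟩
    rw [minimumRefillGo]
    simp only [hpos, if_pos]
    rw [ih fuel (l + 1) (r - 1) _ _ _ (by omega) (by omega)]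
    have hrange : List.range (t + 1) = 0 :: (List.range t).map Nat.succ :=
      List.range_succ_eq_map
    rw [hrange]
    simp only [List.map_cons, List.map_map, List.foldl_cons]
    have hmapl : (List.range t).map ((fun k : Nat => pvGetD plants (l + (k : Int))) ∘ Nat.succ)
        = (List.range t).map (fun k : Nat => pvGetD plants (l + 1 + (k : Int))) := by
      apply List.map_congr_left; intro k _
      simp only [Function.comp]
      congr 1
      push_cast; ring
    have hmapr : (List.range t).map ((fun k : Nat => pvGetD plants (r - (k : Int))) ∘ Nat.succ)
        = (List.range t).map (fun k : Nat => pvGetD plants (r - 1 - (k : Int))) := by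
      apply List.map_congr_left; intro k _
      simp only [Function.comp]
      congr 1
      push_cast; ring
    rw [hmapl, hmapr]
    simp only [Nat.cast_zero, add_zero, sub_zero]
    rw [show (altStep cA (a, 0) (pvGetD plants l))
          = (if pvGetD plants l ≤ a then a - pvGetD plants l else cA - pvGetD plants l,
             if pvGetD plants l ≤ a then (0:Int) else 1) by
        simp [altStep]; split <;> simp,
        show (altStep cB (b, 0) (pvGetD plants r))
          = (if pvGetD plants r ≤ b then b - pvGetD plants r else cB - pvGetD plants r,
             if pvGetD plants r ≤ b then (0:Int) else 1) by
        simp [altStep]; split <;> simp]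
    rw [foldl_altStep_add cA _ _ (if pvGetD plants l ≤ a then (0:Int) else 1),
        foldl_altStep_add cB _ _ (if pvGetD plants r ≤ b then (0:Int) else 1)]
    refine Prod.ext (by push_cast; ring) (Prod.ext (by push_cast; ring) (Prod.ext rfl (Prod.ext rfl ?_)))
    split_ifs <;> push_cast <;> ring

theorem pvGetD_nat (plants : List Int) (k : Nat) (hk : k < plants.length) :
    pvGetD plants (k : Int) = plants[k] := by
  simp [pvGetD, PySem.List.pyGet?_natCast, List.getElem?_eq_getElem hk]

theorem take_eq_map_range (plants : List Int) (m : Nat) (hm : m ≤ plants.length) :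
    plants.take m = (List.range m).map (fun k : Nat => pvGetD plants ((k : Int))) := by
  apply List.ext_getElem
  · simp only [List.length_take, List.length_map, List.length_range]
    omega
  · intro i h1 h2
    have hi : i < m := by simpa using h2
    have hil : i < plants.length := lt_of_lt_of_le hi hm
    rw [List.getElem_take, List.getElem_map, List.getElem_range, pvGetD_nat plants i hil]

theorem drop_rev_eq_map_range (plants : List Int) (m : Nat) (hm : m ≤ plants.length) :
    (plants.drop (plants.length - m)).reverse
      = (List.range m).map (fun k : Nat => pvGetD plants (((plants.length : Int) - 1) - (k : Int))) := by
  apply List.ext_getElem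
  · simp; omega
  · intro i h1 h2
    have hi : i < m := by simpa using h2
    rw [List.getElem_reverse, List.getElem_drop]
    simp only [List.getElem_map, List.getElem_range]
    have : ((plants.length : Int) - 1) - (i : Int) = ((plants.length - 1 - i : Nat) : Int) := by
      omega
    rw [this, pvGetD_nat plants _ (by omega)]
    congr 1
    simp only [List.length_drop]
    omega

-- the prefix-sum table of B is the list of partial sums
theorem altPre_eq (seq : List Int) :
    altPre seq = (List.range (seq.length + 1)).map (fun j => (seq.take j).sum) := by
  induction seq using List.reverseRecOn with
  | nil => simp [altPre]
  | append_singleton xs x ih =>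
    have hstep : altPre (xs ++ [x])
        = altPre xs ++ [(PySem.List.pyGet? (altPre xs) (-1)).getD 0 + x] := by
      simp [altPre, List.foldl_append]
    rw [hstep, ih]
    have hlast : (PySem.List.pyGet?
        ((List.range (xs.length + 1)).map (fun j => (xs.take j).sum)) (-1)).getD 0 = xs.sum := by
      rw [PySem.List.pyGet?_neg_one]
      rw [List.getLast?_eq_getElem?]
      simp [List.range_succ]
    rw [hlast]
    have hr : (List.range ((xs ++ [x]).length + 1)).map (fun j => ((xs ++ [x]).take j).sum)
        = (List.range (xs.length + 1)).map (fun j => (xs.take j).sum) ++ [xs.sum + x] := by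
      rw [show (xs ++ [x]).length + 1 = (xs.length + 1) + 1 by simp, List.range_succ,
          List.map_append]
      congr 1
      · apply List.map_congr_left
        intro j hj
        have hjle : j ≤ xs.length := by
          have := List.mem_range.mp hj; omega
        rw [List.take_append_of_le_length hjle]
      · simp
    rw [hr]

theorem altPre_getD (seq : List Int) (j : Nat) (hj : j ≤ seq.length) :
    pvGetD (altPre seq) (j : Int) = (seq.take j).sum := by
  rw [altPre_eq, pvGetD, PySem.List.pyGet?_natCast]
  rw [List.getElem?_eq_getElem (by simp; omega)]
  simp

-- B's crossing count over the prefix table equals the tank simulation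
theorem altPass_inv (seq : List Int) (cap : Int) (k : Nat) (hk : k ≤ seq.length) :
    ∃ last : Nat, last ≤ k ∧
      ((List.range k).foldl
        (fun (st : Int × Int) (i : Nat) =>
          if pvGetD (altPre seq) ((i : Int) + 1) - pvGetD (altPre seq) st.2 > cap
          then (st.1 + 1, (i : Int)) else st) (0, 0))
        = (((seq.take k).foldl (altStep cap) (cap, 0)).2, (last : Int)) ∧
      ((seq.take k).foldl (altStep cap) (cap, 0)).1
        = cap - ((seq.take k).sum - (seq.take last).sum) := by
  induction k with
  | zero => exact ⟨0, le_refl _, by simp, by simp⟩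
  | succ k ih =>
    obtain ⟨last, hlk, hfold, htank⟩ := ih (by omega)
    have hklen : k < seq.length := by omega
    have htake : seq.take (k + 1) = seq.take k ++ [seq[k]] := by
      rw [List.take_add_one, List.getElem?_eq_getElem hklen]; rfl
    have hsum : (seq.take (k + 1)).sum = (seq.take k).sum + seq[k] := by
      rw [htake, List.sum_append]; simp
    have hpre1 : pvGetD (altPre seq) ((k : Int) + 1) = (seq.take (k + 1)).sum := by
      rw [show ((k : Int) + 1) = ((k + 1 : Nat) : Int) by push_cast; ring]
      exact altPre_getD seq (k + 1) (by omega)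
    have hprelast : pvGetD (altPre seq) (last : Int) = (seq.take last).sum :=
      altPre_getD seq last (by omega)
    rw [List.range_succ, List.foldl_append, List.foldl_cons, List.foldl_nil, hfold]
    rw [htake, List.foldl_append, List.foldl_cons, List.foldl_nil]
    simp only [hpre1, hprelast]
    by_cases hc : (seq.take (k + 1)).sum - (seq.take last).sum > cap
    · -- refill at plant k
      have hstep : altStep cap ((seq.take k).foldl (altStep cap) (cap, 0)) seq[k]
          = (cap - seq[k], ((seq.take k).foldl (altStep cap) (cap, 0)).2 + 1) := by
        rw [altStep, if_neg]
        rw [htank]; omega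
      refine ⟨k, by omega, ?_, ?_⟩
      · rw [if_pos hc, hstep]
      · rw [hstep]; simp only [List.sum_append, List.sum_cons, List.sum_nil]; ring
    · -- no refill at plant k
      have hstep : altStep cap ((seq.take k).foldl (altStep cap) (cap, 0)) seq[k]
          = (((seq.take k).foldl (altStep cap) (cap, 0)).1 - seq[k],
             ((seq.take k).foldl (altStep cap) (cap, 0)).2) := by
        rw [altStep, if_pos]
        rw [htank]; omega
      refine ⟨last, by omega, ?_, ?_⟩
      · rw [if_neg hc, hstep]
      · rw [hstep]; simp only [htank, List.sum_append, List.sum_cons, List.sum_nil]; ring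
  
theorem altPass_eq (seq : List Int) (cap : Int) :
    altPass seq cap
      = ((seq.foldl (altStep cap) (cap, 0)).2, (seq.foldl (altStep cap) (cap, 0)).1) := by
  obtain ⟨last, hlk, hfold, htank⟩ := altPass_inv seq cap seq.length (le_refl _)
  simp only [List.take_length] at hfold htank
  simp only [altPass, hfold]
  rw [altPre_getD seq seq.length (le_refl _), altPre_getD seq last hlk]
  simp only [List.take_length]
  rw [htank]

-- ===== VERDICT (by name: the statement is the Claim_ definition above) =====
theorem minimumRefill_spec : Claim_equal_minimumRefill := by
  intro plants capacityA capacityB _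
  unfold Spec_minimumRefill minimumRefill minimumRefill_alt
  by_cases hn : plants.length ≤ 2
  · simp [hn]
  · simp only [hn, if_false]
    have hm : plants.length / 2 ≤ plants.length := Nat.div_le_self _ 2
    rw [go_eq plants capacityA capacityB (plants.length / 2) plants.length 0
        ((plants.length : Int) - 1) capacityA capacityB 0 (by omega) (by omega)]
    rw [PySem.List.slice_to_natCast, PySem.List.slice_from_natCast]
    rw [altPass_eq, altPass_eq]
    rw [take_eq_map_range plants (plants.length / 2) hm,
        drop_rev_eq_map_range plants (plants.length / 2) hm]
    have hcond : ((plants.length : Int) - 1 - ((plants.length / 2 : Nat) : Int) - ((plants.length / 2 : Nat) : Int) = 0)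
        ↔ (plants.length % 2 = 1) := by omega
    simp only [zero_add]
    simp only [hcond]
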